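-- pv_equiv track=rewrite | github.com/ZionSS/Data-Struce-Grader | Ex02-2.py | weirdSubtract
-- ===== SOURCE A (Python) =====
-- def weirdSubtract(n,k):
--     counter = 0
--     while counter<k:
--         if n%10 != 0 :
--             n-=1
--             counter+=1
--         else :
--             n/=10
--             counter+=1
--     return int(n)
-- ===== SOURCE B (Python) =====
-- def weirdSubtract(n, k):
--     while k > 0:
--         if n == 0:
--             return 0
--         if n == -1:
--             return -1 - (k % 10)
--         r = n % 10
--         if r != 0:
--             if k <= r:
--                 return n - k
--             n -= r
--             k -= r
--         else:
--             n //= 10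
--             k -= 1
--     return n
-- ===== Notes on version B (the rewrite author's own statement) =====
-- stated objective: faster
-- what changed: Instead of A's one-unit-per-iteration loop running k times, B batches the n%10 consecutive subtractions into one arithmetic step, early-returns when fewer than a full batch of steps remain, and short-circuits the fixed point n=0 and the 10-step cycle at n=-1 with closed forms.
import Mathlib
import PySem

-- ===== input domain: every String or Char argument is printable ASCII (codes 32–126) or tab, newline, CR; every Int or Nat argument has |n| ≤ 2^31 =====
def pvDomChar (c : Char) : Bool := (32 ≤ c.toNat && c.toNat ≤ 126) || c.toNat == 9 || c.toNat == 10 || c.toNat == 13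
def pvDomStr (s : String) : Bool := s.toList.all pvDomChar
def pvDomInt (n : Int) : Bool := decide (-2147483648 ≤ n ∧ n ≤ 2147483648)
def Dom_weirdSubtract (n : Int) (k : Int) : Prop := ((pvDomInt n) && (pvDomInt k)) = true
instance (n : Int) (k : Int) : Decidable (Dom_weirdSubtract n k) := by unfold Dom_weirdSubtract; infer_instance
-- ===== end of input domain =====

-- B replaces A's one-step-at-a-time loop by batching the n%10 subtractions and short-circuiting the
-- fixed points n = 0 and the 10-step cycle at n = -1; measurably faster (asymptotic in k).
-- Note on A's `n /= 10`: it only runs when n % 10 == 0, and all intermediate values stay well below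
-- 2^53 on Dom, so the float division and the final int(n) are exactly integer division / identity.

-- ===== PORT A =====
def weirdSubtractGo (n : Int) (counter : Int) (k : Int) : Int :=
  if counter < k then
    if PySem.Int.mod n 10 ≠ 0 then
      weirdSubtractGo (n - 1) (counter + 1) k
    else
      -- n /= 10 : exact floor division here (10 ∣ n, values float-exact on Dom)
      weirdSubtractGo (PySem.Int.floordiv n 10) (counter + 1) k
  else n
termination_by (k - counter).toNat
decreasing_by all_goals omega

def weirdSubtract (n : Int) (k : Int) : Int :=
  weirdSubtractGo n 0 k

-- ===== PORT B =====
def weirdSubtract_alt (n : Int) (k : Int) : Int :=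
  if h : 0 < k then
    if n = 0 then 0
    else if n = -1 then -1 - PySem.Int.mod k 10
    else
      let r := PySem.Int.mod n 10
      if hr : r ≠ 0 then
        if k ≤ r then n - k
        else weirdSubtract_alt (n - r) (k - r)
      else weirdSubtract_alt (PySem.Int.floordiv n 10) (k - 1)
  else n
termination_by k.toNat
decreasing_by
  · have h0 : 0 ≤ PySem.Int.mod n 10 := PySem.Int.mod_nonneg n (by norm_num)
    simp only [r] at *; omega
  · omega

-- ===== PRECONDITION & SPEC =====
def Spec_weirdSubtract (n : Int) (k : Int) (out : Int) : Prop := out = weirdSubtract_alt n k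
instance (n : Int) (k : Int) (out : Int) : Decidable (Spec_weirdSubtract n k out) := by unfold Spec_weirdSubtract; infer_instance

-- ===== CLAIM (what is proved, stated in full; the proofs are below) =====
def Claim_equal_weirdSubtract : Prop := ∀ (n : Int) (k : Int), Dom_weirdSubtract n k → Spec_weirdSubtract n k (weirdSubtract n k)

-- ===== LEMMAS AND PROOFS =====

/-- One iteration of A's loop body. -/
def wsStep (n : Int) : Int :=
  if PySem.Int.mod n 10 ≠ 0 then n - 1 else PySem.Int.floordiv n 10

lemma weirdSubtractGo_eq_iterate (m : Nat) :
    ∀ (n counter k : Int), (k - counter).toNat = m →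
      weirdSubtractGo n counter k = wsStep^[m] n := by
  induction m with
  | zero =>
    intro n counter k hm
    rw [weirdSubtractGo]
    simp only [Function.iterate_zero, id]
    rw [if_neg (by omega)]
  | succ m ih =>
    intro n counter k hm
    rw [weirdSubtractGo, if_pos (by omega)]
    rw [Function.iterate_succ_apply]
    unfold wsStep
    split_ifs with hmod
    · exact ih _ _ _ (by omega)
    · exact ih _ _ _ (by omega)

lemma wsStep_iterate_zero (j : Nat) : wsStep^[j] 0 = 0 := by
  induction j with
  | zero => rfl
  | succ j ih => rw [Function.iterate_succ_apply', ih]; decide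

lemma wsStep_iterate_neg_one (j : Nat) : wsStep^[j] (-1) = -1 - (j % 10 : Nat) := by
  induction j with
  | zero => rfl
  | succ j ih =>
    rw [Function.iterate_succ_apply', ih]
    have hr : j % 10 < 10 := Nat.mod_lt _ (by norm_num)
    unfold wsStep
    rw [PySem.Int.mod_eq_emod_of_pos (by norm_num)]
    by_cases h9 : j % 10 = 9
    · rw [if_neg (by simp [h9])]
      rw [PySem.Int.floordiv_eq_ediv_of_pos (by norm_num)]
      have : (j + 1) % 10 = 0 := by omega
      rw [this]; norm_num [h9]
    · rw [if_pos (by push_cast; omega)]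
      have : (j + 1) % 10 = j % 10 + 1 := by omega
      rw [this]; push_cast; ring

lemma wsStep_iterate_sub (j : Nat) :
    ∀ (n : Int), (j : Int) ≤ PySem.Int.mod n 10 → wsStep^[j] n = n - j := by
  induction j with
  | zero => intro n _; simp
  | succ j ih =>
    intro n hj
    have hmod := PySem.Int.mod_eq_emod_of_pos (b := 10) (a := n) (by norm_num)
    rw [Function.iterate_succ_apply', ih n (by push_cast at hj ⊢; omega)]
    unfold wsStep
    rw [PySem.Int.mod_eq_emod_of_pos (by norm_num)]
    have h1 : (n - j) % 10 = n % 10 - j := by push_cast at hj; omega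
    rw [if_pos (by rw [h1]; push_cast at hj ⊢; omega)]
    push_cast; ring

lemma weirdSubtract_alt_eq_iterate (m : Nat) :
    ∀ (n k : Int), k.toNat = m → weirdSubtract_alt n k = wsStep^[m] n := by
  induction m using Nat.strong_induction_on with
  | _ m ih =>
    intro n k hm
    rw [weirdSubtract_alt]
    by_cases hk : 0 < k
    · rw [dif_pos hk]
      by_cases h0 : n = 0
      · rw [if_pos h0, h0, wsStep_iterate_zero]
      rw [if_neg h0]
      by_cases h1 : n = -1
      · rw [if_pos h1, h1, wsStep_iterate_neg_one]
        rw [PySem.Int.mod_eq_emod_of_pos (by norm_num)]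
        have : ((m % 10 : Nat) : Int) = k % 10 := by
          have : (m : Int) = k := by omega
          omega
        rw [this]
      rw [if_neg h1]
      have hnn : 0 ≤ PySem.Int.mod n 10 := PySem.Int.mod_nonneg n (by norm_num)
      have hlt : PySem.Int.mod n 10 < 10 := PySem.Int.mod_lt n (by norm_num)
      by_cases hr : PySem.Int.mod n 10 ≠ 0
      · rw [dif_pos hr]
        by_cases hkr : k ≤ PySem.Int.mod n 10
        · rw [if_pos hkr]
          rw [wsStep_iterate_sub m n (by omega)]
          omega
        · rw [if_neg hkr]
          have hr1 : 1 ≤ PySem.Int.mod n 10 := by omega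
          have hsplit : m = (k - PySem.Int.mod n 10).toNat + (PySem.Int.mod n 10).toNat := by
            omega
          rw [ih _ (by omega) _ _ rfl, hsplit, Function.iterate_add_apply,
            wsStep_iterate_sub _ n (by omega)]
          congr 1
          omega
      · rw [dif_neg hr]
        have hsplit : m = (k - 1).toNat + 1 := by omega
        rw [ih _ (by omega) _ _ rfl, hsplit, Function.iterate_succ_apply]
        have : wsStep n = PySem.Int.floordiv n 10 := by
          unfold wsStep; rw [if_neg (by simpa using hr)]
        rw [this]
    · rw [dif_neg hk]
      have : m = 0 := by omega
      rw [this]; rfl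

-- ===== VERDICT (by name: the statement is the Claim_ definition above) =====
theorem weirdSubtract_spec : Claim_equal_weirdSubtract := by
  intro n k _
  unfold Spec_weirdSubtract weirdSubtract
  rw [weirdSubtractGo_eq_iterate k.toNat n 0 k (by omega),
    weirdSubtract_alt_eq_iterate k.toNat n k rfl]
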